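-- pv_equiv track=rewrite | github.com/chaltteog/AlgorithmofPython | code/1316/1316.py | check_word_char
-- ===== SOURCE A (Python) =====
-- def check_word_char(word):
--     chars = list()
--     char_set = set()
--
--     for i in range(0, len(word)):
--         if (word[i - 1] == word[i]) and (i != 0):
--             continue
--
--         chars.append(word[i])
--         char_set.add(word[i])
--
--     return len(chars) - len(char_set)
-- ===== SOURCE B (Python) =====
-- def check_word_char(word):
--     # A run start at i > 0 begins a *repeated* group exactly when its character
--     # has already occurred somewhere earlier in the word (any earlier occurrence
--     # implies an earlier group of that character).  Count those run starts directly.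
--     return sum(1 for i in range(1, len(word))
--                if word[i] != word[i - 1] and word[i] in word[:i])
-- ===== Notes on version B (the rewrite author's own statement) =====
-- stated objective: simpler
-- what changed: Instead of A's loop maintaining a collapsed-groups list plus an incremental set and subtracting their sizes, B counts directly the run starts i>0 whose character already occurs in word[:i] (each such start is exactly one repeated group), with no list, no set and no subtraction.
import Mathlib
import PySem

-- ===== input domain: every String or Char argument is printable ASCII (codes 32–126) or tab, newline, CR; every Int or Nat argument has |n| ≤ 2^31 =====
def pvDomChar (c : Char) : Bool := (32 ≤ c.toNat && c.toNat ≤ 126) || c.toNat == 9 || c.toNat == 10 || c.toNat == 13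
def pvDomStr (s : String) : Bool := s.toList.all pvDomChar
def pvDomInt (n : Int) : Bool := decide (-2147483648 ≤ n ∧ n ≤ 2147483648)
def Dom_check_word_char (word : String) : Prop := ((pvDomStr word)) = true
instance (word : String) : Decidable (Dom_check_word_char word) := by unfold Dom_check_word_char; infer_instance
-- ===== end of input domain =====

-- B counts directly the run starts i>0 whose character already occurs in word[:i] (each is exactly
-- one repeated group), instead of A's collapsed list + incremental set and a subtraction (objective: simpler).

-- ===== PORT A =====
-- all indices the loop touches are in range (i ∈ [0,len), and word[-1] only when word ≠ ''), so pyGetD is exact here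
def check_word_char (word : String) : Int :=
  let l := word.toList
  let st := (PySem.List.pyRange 0 (l.length : Int) 1).foldl
    (fun (st : List Char × PySem.Set Char) i =>
      if PySem.List.pyGetD l (i - 1) ' ' = PySem.List.pyGetD l i ' ' ∧ i ≠ 0 then st
      else (st.1 ++ [PySem.List.pyGetD l i ' '], PySem.Set.add st.2 (PySem.List.pyGetD l i ' ')))
    ([], PySem.Set.empty)
  (st.1.length : Int) - (st.2.length : Int)

-- ===== PORT B =====
-- sum(1 for i in range(1, len(word)) if word[i] != word[i-1] and word[i] in word[:i])
def check_word_char_alt (word : String) : Int :=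
  let l := word.toList
  (PySem.List.pyRange 1 (l.length : Int) 1).foldl
    (fun (acc : Int) i =>
      acc + (if PySem.List.pyGetD l i ' ' ≠ PySem.List.pyGetD l (i - 1) ' ' ∧
                (PySem.List.slice l none (some i)).contains (PySem.List.pyGetD l i ' ')
             then 1 else 0)) 0

-- ===== PRECONDITION & SPEC =====
def Spec_check_word_char (word : String) (out : Int) : Prop := out = check_word_char_alt word
instance (word : String) (out : Int) : Decidable (Spec_check_word_char word out) := by unfold Spec_check_word_char; infer_instance

-- ===== CLAIM (what is proved, stated in full; the proofs are below) =====
def Claim_equal_check_word_char : Prop := ∀ (word : String), Dom_check_word_char word → Spec_check_word_char word (check_word_char word)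

-- ===== LEMMAS AND PROOFS =====

-- number of adjacent transitions in rest, given the previous character
def pvTrans (prev : Char) (rest : List Char) : Int :=
  match rest with
  | [] => 0
  | x :: r => (if x ≠ prev then 1 else 0) + pvTrans x r

-- number of run starts in rest whose character is already in seen (the processed prefix)
def pvRep (prev : Char) (seen rest : List Char) : Int :=
  match rest with
  | [] => 0
  | x :: r => (if x ≠ prev ∧ x ∈ seen then 1 else 0) + pvRep x (seen ++ [x]) r

-- ---- A-side: the single loop = (1 + transitions) - |set(word)| ----

-- fold over range [a, len) of a body reading word[i-1], word[i]  =  fold over consecutive pairs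
theorem pv_pair_fold {α β : Type} (l : List α) (d : α) (g : β → α → α → β) :
    ∀ (n a : Nat) (init : β), 1 ≤ a → l.length ≤ a + n →
    (PySem.List.pyRange (a : Int) (l.length : Int) 1).foldl
        (fun s i => g s (PySem.List.pyGetD l (i - 1) d) (PySem.List.pyGetD l i d)) init
      = ((l.drop (a - 1)).zip (l.drop a)).foldl (fun s p => g s p.1 p.2) init := by
  intro n
  induction n with
  | zero =>
    intro a init ha hle
    rw [PySem.List.pyRange_one_eq_nil (by exact_mod_cast by omega),
      show List.drop a l = [] from List.drop_eq_nil_of_le (by omega), List.zip_nil_right]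
    rfl
  | succ n ih =>
    intro a init ha hle
    by_cases h : l.length ≤ a
    · rw [PySem.List.pyRange_one_eq_nil (by exact_mod_cast h),
        show List.drop a l = [] from List.drop_eq_nil_of_le h, List.zip_nil_right]
      rfl
    · rw [not_le] at h
      rw [PySem.List.pyRange_one_cons (by exact_mod_cast h)]
      have h1 : a - 1 < l.length := by omega
      have h2 : a < l.length := h
      rw [List.drop_eq_getElem_cons h1, List.drop_eq_getElem_cons h2]
      have e1 : PySem.List.pyGetD l ((a : Int) - 1) d = l[a - 1] := by
        rw [PySem.List.pyGetD_eq_getElem l d (by omega) (by omega)]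
        simp [show (((a : Int) - 1)).toNat = a - 1 from by omega]
      have e2 : PySem.List.pyGetD l (a : Int) d = l[a] := by
        rw [PySem.List.pyGetD_eq_getElem l d (by omega) (by exact_mod_cast h)]
        simp
      simp only [List.foldl_cons, e1, e2, List.zip_cons_cons]
      rw [show ((a : Int) + 1) = ((a + 1 : Nat) : Int) from by omega,
        ih (a + 1) _ (by omega) (by omega),
        show a + 1 - 1 = a from by omega, show a - 1 + 1 = a from by omega]

theorem pv_pair_fold_one {α β : Type} (l : List α) (d : α) (g : β → α → α → β) (init : β) :
    (PySem.List.pyRange 1 (l.length : Int) 1).foldl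
        (fun s i => g s (PySem.List.pyGetD l (i - 1) d) (PySem.List.pyGetD l i d)) init
      = (l.zip l.tail).foldl (fun s p => g s p.1 p.2) init := by
  have h := pv_pair_fold l d g l.length 1 init (by omega) (by omega)
  simpa using h

def pvStep (st : List Char × PySem.Set Char) (p : Char × Char) : List Char × PySem.Set Char :=
  if p.1 = p.2 then st else (st.1 ++ [p.2], PySem.Set.add st.2 p.2)

theorem pv_len_fold (P : List (Char × Char)) :
    ∀ (ch : List Char) (S : PySem.Set Char),
      ((P.foldl pvStep (ch, S)).1).length = ch.length + P.countP (fun p => p.1 ≠ p.2) := by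
  induction P with
  | nil => intro ch S; simp
  | cons p P ih =>
    intro ch S
    simp only [List.foldl_cons, pvStep, List.countP_cons]
    by_cases h : p.1 = p.2
    · simp [h, ih]
    · simp only [h, if_false, ih, List.length_append, List.length_singleton]
      simp [h]
      omega

theorem pv_set_mem_add (S : PySem.Set Char) (c : Char) (h : c ∈ S) :
    PySem.Set.add S c = S := by
  simp [PySem.Set.add, PySem.Set.contains, h]

theorem pv_set_fold :
    ∀ (t : List Char) (c : Char) (ch : List Char) (S : PySem.Set Char), c ∈ S →
      (((c :: t).zip t).foldl pvStep (ch, S)).2 = PySem.Set.update S t := by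
  intro t
  induction t with
  | nil => intro c ch S _; simp [PySem.Set.update]
  | cons b t ih =>
    intro c ch S hc
    simp only [List.zip_cons_cons, List.foldl_cons, pvStep, PySem.Set.update, List.foldl_cons]
    by_cases h : c = b
    · simp only [h]
      rw [pv_set_mem_add S b (h ▸ hc)] at *
      have := ih b ch S (h ▸ hc)
      simpa [PySem.Set.update, pv_set_mem_add S b (h ▸ hc)] using this
    · simp only [h, if_false]
      exact ih b _ (PySem.Set.add S b) (by simp [PySem.Set.mem_add])

theorem pv_ofList_cons (c : Char) (t : List Char) :
    PySem.Set.ofList (c :: t) = PySem.Set.update (PySem.Set.add PySem.Set.empty c) t := by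
  simp [PySem.Set.ofList_eq_foldl, PySem.Set.update]

-- pair-wise transition count = pvTrans
theorem pv_countP_trans : ∀ (t : List Char) (c : Char),
    ((((c :: t).zip t).countP (fun p => p.1 ≠ p.2) : Nat) : Int) = pvTrans c t := by
  intro t
  induction t with
  | nil => intro c; simp [pvTrans]
  | cons b r ih =>
    intro c
    rw [List.zip_cons_cons, List.countP_cons]
    push_cast
    rw [ih b]
    simp only [pvTrans]
    by_cases h : c = b
    · simp [h]
    · simp [h, Ne.symm h]
      ring

-- ---- B-side: the range-fold = pvRep over (prev, processed prefix, remaining suffix) ----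

theorem pv_add_length (S : PySem.Set Char) (x : Char) :
    ((PySem.Set.add S x).length : Int) = (S.length : Int) + (if x ∈ S then 0 else 1) := by
  by_cases h : x ∈ S
  · simp [PySem.Set.add, PySem.Set.contains, h]
  · simp [PySem.Set.add, PySem.Set.contains, h]

theorem pv_ofList_append (seen : List Char) (x : Char) :
    PySem.Set.ofList (seen ++ [x]) = PySem.Set.add (PySem.Set.ofList seen) x := by
  simp [PySem.Set.ofList_eq_foldl, List.foldl_append]

-- the key reformulation: counting repeated run starts = transitions - newly seen characters
theorem pv_key : ∀ (rest : List Char) (prev : Char) (seen : List Char), prev ∈ seen →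
    pvRep prev seen rest
      = pvTrans prev rest
        - (((PySem.Set.update (PySem.Set.ofList seen) rest).length : Int)
             - ((PySem.Set.ofList seen).length : Int)) := by
  intro rest
  induction rest with
  | nil => intro prev seen _; simp [pvRep, pvTrans, PySem.Set.update]
  | cons x r ih =>
    intro prev seen hprev
    have hupd : PySem.Set.update (PySem.Set.ofList seen) (x :: r)
        = PySem.Set.update (PySem.Set.ofList (seen ++ [x])) r := by
      simp [PySem.Set.update, pv_ofList_append]
    have hIH := ih x (seen ++ [x]) (by simp)
    simp only [pvRep, pvTrans, hupd, hIH, pv_ofList_append, pv_add_length]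
    by_cases hx : x ∈ seen
    · have hmem : x ∈ PySem.Set.ofList seen := (PySem.Set.mem_ofList seen x).mpr hx
      simp only [hx, and_true, hmem, if_true]
      ring
    · have hmem : x ∉ PySem.Set.ofList seen := fun h => hx ((PySem.Set.mem_ofList seen x).mp h)
      have hne : x ≠ prev := fun e => hx (e ▸ hprev)
      simp only [hx, and_false, if_false, hmem, if_false, hne, ne_eq, not_false_iff, if_true]
      ring

-- B's fold over range [a, len) equals pvRep of (word[a-1], word[:a], word[a:])
theorem pv_b_fold (l : List Char) :
    ∀ (n a : Nat) (acc : Int), 1 ≤ a → l.length ≤ a + n →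
    (PySem.List.pyRange (a : Int) (l.length : Int) 1).foldl
        (fun (acc : Int) i =>
          acc + (if PySem.List.pyGetD l i ' ' ≠ PySem.List.pyGetD l (i - 1) ' ' ∧
                    (PySem.List.slice l none (some i)).contains (PySem.List.pyGetD l i ' ')
                 then 1 else 0)) acc
      = acc + pvRep (PySem.List.pyGetD l ((a : Int) - 1) ' ') (l.take a) (l.drop a) := by
  intro n
  induction n with
  | zero =>
    intro a acc ha hle
    rw [PySem.List.pyRange_one_eq_nil (by exact_mod_cast by omega),
      show List.drop a l = [] from List.drop_eq_nil_of_le (by omega)]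
    simp [pvRep]
  | succ n ih =>
    intro a acc ha hle
    by_cases h : l.length ≤ a
    · rw [PySem.List.pyRange_one_eq_nil (by exact_mod_cast h),
        show List.drop a l = [] from List.drop_eq_nil_of_le h]
      simp [pvRep]
    · rw [not_le] at h
      rw [PySem.List.pyRange_one_cons (by exact_mod_cast h)]
      have h1 : a - 1 < l.length := by omega
      have e1 : PySem.List.pyGetD l ((a : Int) - 1) ' ' = l[a - 1] := by
        rw [PySem.List.pyGetD_eq_getElem l ' ' (by omega) (by omega)]
        simp [show (((a : Int) - 1)).toNat = a - 1 from by omega]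
      have e2 : PySem.List.pyGetD l (a : Int) ' ' = l[a] := by
        rw [PySem.List.pyGetD_eq_getElem l ' ' (by omega) (by exact_mod_cast h)]
        simp
      have eslice : PySem.List.slice l none (some (a : Int)) = l.take a :=
        PySem.List.slice_to_natCast l a
      have edrop : l.drop a = l[a] :: l.drop (a + 1) := List.drop_eq_getElem_cons h
      have etake : l.take (a + 1) = l.take a ++ [l[a]] := by
        rw [List.take_add_one]
        simp [List.getElem?_eq_getElem h]
      simp only [List.foldl_cons, e1, e2, eslice]
      rw [show ((a : Int) + 1) = ((a + 1 : Nat) : Int) from by omega,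
        ih (a + 1) _ (by omega) (by omega)]
      have e1' : PySem.List.pyGetD l (((a + 1 : Nat) : Int) - 1) ' ' = l[a] := by
        rw [show (((a + 1 : Nat) : Int) - 1) = (a : Int) from by push_cast; ring]
        exact e2
      rw [e1', edrop, etake]
      simp only [pvRep, List.contains_iff_mem]
      split_ifs with hc <;> ring

-- ===== VERDICT (by name: the statement is the Claim_ definition above) =====
theorem check_word_char_spec : Claim_equal_check_word_char := by
  intro word _
  unfold Spec_check_word_char check_word_char check_word_char_alt
  cases hl : word.toList with
  | nil => simp [PySem.List.pyRange_one_eq_nil]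
  | cons c t =>
    simp only
    have hlen : (c :: t).length = t.length + 1 := by simp
    -- A: peel i = 0 from the loop
    rw [PySem.List.pyRange_one_cons (a := 0) (by exact_mod_cast by omega)]
    simp only [List.foldl_cons, zero_sub, ne_eq, not_true_eq_false, and_false, if_false]
    have hget0 : PySem.List.pyGetD (c :: t) (0 : Int) ' ' = c := by
      simp [PySem.List.pyGetD_zero_cons]
    rw [hget0]
    -- rewrite A's remaining loop (i ≥ 1, so the i ≠ 0 test is true) as a pair fold
    have hbodyA :
        (PySem.List.pyRange (0 + 1) (((c :: t).length : Nat) : Int) 1).foldl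
          (fun (st : List Char × PySem.Set Char) i =>
            if PySem.List.pyGetD (c :: t) (i - 1) ' ' = PySem.List.pyGetD (c :: t) i ' ' ∧ i ≠ 0
            then st
            else (st.1 ++ [PySem.List.pyGetD (c :: t) i ' '],
                  PySem.Set.add st.2 (PySem.List.pyGetD (c :: t) i ' ')))
          ([] ++ [c], PySem.Set.add PySem.Set.empty c)
        = (PySem.List.pyRange 1 (((c :: t).length : Nat) : Int) 1).foldl
          (fun (st : List Char × PySem.Set Char) i =>
            pvStep st (PySem.List.pyGetD (c :: t) (i - 1) ' ', PySem.List.pyGetD (c :: t) i ' '))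
          ([c], PySem.Set.add PySem.Set.empty c) := by
      rw [show ((0 : Int) + 1) = 1 from rfl, show ([] ++ [c] : List Char) = [c] from rfl]
      apply PySem.List.foldl_congr_mem
      intro st i hi
      have h1 : (1 : Int) ≤ i := (PySem.List.mem_pyRange_one.mp hi).1
      have hne : i ≠ 0 := by omega
      simp [pvStep, hne]
    rw [hbodyA]
    rw [pv_pair_fold_one (c :: t) ' ' (fun st p q => pvStep st (p, q))]
    simp only [List.tail_cons, Prod.mk.eta]
    rw [pv_len_fold (((c :: t).zip t)) [c] (PySem.Set.add PySem.Set.empty c)]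
    rw [pv_set_fold t c [c] (PySem.Set.add PySem.Set.empty c) (by simp)]
    -- B: the range fold is pvRep c [c] t
    have hB := pv_b_fold (c :: t) (c :: t).length 1 0 (by omega) (by omega)
    rw [show ((1 : Nat) : Int) = (1 : Int) from rfl] at hB
    rw [hB]
    have hg : PySem.List.pyGetD (c :: t) ((1 : Int) - 1) ' ' = c := by
      simp [PySem.List.pyGetD_zero_cons]
    rw [hg, show (c :: t).take 1 = [c] from rfl, show (c :: t).drop 1 = t from rfl]
    -- combine via the key reformulation
    have hkey := pv_key t c [c] (by simp)
    have hofl : PySem.Set.ofList [c] = PySem.Set.add PySem.Set.empty c := rfl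
    rw [hofl] at hkey
    rw [zero_add, hkey]
    rw [show PySem.Set.update (PySem.Set.add PySem.Set.empty c) t
          = PySem.Set.ofList (c :: t) from (pv_ofList_cons c t).symm]
    rw [pv_ofList_cons c t]
    have hc1 : ((PySem.Set.add PySem.Set.empty c).length : Int) = 1 := rfl
    rw [hc1]
    rw [← pv_countP_trans t c]
    simp only [List.length_singleton]
    push_cast
    ring
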